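-- pv_equiv track=rewrite | github.com/samuelhklumpers/vaccine-scheduling-nintendads | c#_implementation/tests/tester.py | alpha_label
-- ===== SOURCE A (Python) =====
-- def alpha_label(i):
--     ret = ""
--     a = ord('a')
--
--     i, r = i // 26, i % 26
--     ret = chr(a + r) + ret
--     while i > 0:
--         i, r = i // 26, i % 26
--         ret = chr(a + r) + ret
--
--     return ret
-- ===== SOURCE B (Python) =====
-- def alpha_label(i):
--     q, r = divmod(i, 26)
--     return (alpha_label(q) if q > 0 else "") + chr(ord('a') + r)
-- ===== Notes on version B (the rewrite author's own statement) =====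
-- stated objective: simpler
-- what changed: Replaces the do-while loop that prepends characters into an accumulator string with a two-line recursion over the quotient that appends the current digit after the recursively built prefix.
import Mathlib
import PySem

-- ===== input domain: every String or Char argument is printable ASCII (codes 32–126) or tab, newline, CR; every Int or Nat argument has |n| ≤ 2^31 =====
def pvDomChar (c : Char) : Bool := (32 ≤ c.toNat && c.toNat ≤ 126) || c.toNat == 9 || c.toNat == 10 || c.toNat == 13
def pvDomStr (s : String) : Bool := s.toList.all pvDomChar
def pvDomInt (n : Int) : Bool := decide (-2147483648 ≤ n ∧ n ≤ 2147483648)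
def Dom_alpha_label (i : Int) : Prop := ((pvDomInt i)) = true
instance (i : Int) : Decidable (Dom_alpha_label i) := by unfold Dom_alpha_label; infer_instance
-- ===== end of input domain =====

-- B replaces A's prepend-into-accumulator do-while loop by a two-line recursion over the quotient (simpler decomposition; same cost).


-- ===== PORT A =====
-- the while-loop: prepend chr(97 + i % 26) and continue with i // 26 while i > 0
def alphaLabelLoop (i : Int) (ret : String) : String :=
  if h : 0 < i then
    alphaLabelLoop (PySem.Int.floordiv i 26)
      (String.ofList [Char.ofNat (97 + PySem.Int.mod i 26).toNat] ++ ret)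
  else ret
termination_by i.toNat
decreasing_by
  have hfd : PySem.Int.floordiv i 26 = i / 26 := PySem.Int.floordiv_eq_ediv_of_pos (by norm_num)
  omega

def alpha_label (i : Int) : String :=
  let i1 := PySem.Int.floordiv i 26
  let r := PySem.Int.mod i 26
  let ret := String.ofList [Char.ofNat (97 + r).toNat] ++ ""
  alphaLabelLoop i1 ret

-- ===== PORT B =====
-- q, r = divmod(i, 26); (alpha_label(q) if q > 0 else "") + chr(ord('a') + r)
def alpha_label_alt (i : Int) : String :=
  let q := PySem.Int.floordiv i 26
  let r := PySem.Int.mod i 26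
  (if h : 0 < q then alpha_label_alt q else "") ++ String.ofList [Char.ofNat (97 + r).toNat]
termination_by i.toNat
decreasing_by
  have hfd : PySem.Int.floordiv i 26 = i / 26 := PySem.Int.floordiv_eq_ediv_of_pos (by norm_num)
  omega

-- ===== PRECONDITION & SPEC =====
def Spec_alpha_label (i : Int) (out : String) : Prop := out = alpha_label_alt i
instance (i : Int) (out : String) : Decidable (Spec_alpha_label i out) := by unfold Spec_alpha_label; infer_instance

-- ===== CLAIM (what is proved, stated in full; the proofs are below) =====
def Claim_equal_alpha_label : Prop := ∀ (i : Int), Dom_alpha_label i → Spec_alpha_label i (alpha_label i)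

-- ===== LEMMAS AND PROOFS =====
theorem alt_unfold (j : Int) :
    alpha_label_alt j =
      (if 0 < PySem.Int.floordiv j 26 then alpha_label_alt (PySem.Int.floordiv j 26) else "") ++
        String.ofList [Char.ofNat (97 + PySem.Int.mod j 26).toNat] := by
  rw [alpha_label_alt]
  simp only [dite_eq_ite]

theorem alphaLabelLoop_eq_alt (i : Int) (ret : String) :
    alphaLabelLoop i ret = (if 0 < i then alpha_label_alt i else "") ++ ret := by
  rw [alphaLabelLoop]
  by_cases h : 0 < i
  · rw [dif_pos h, alphaLabelLoop_eq_alt (PySem.Int.floordiv i 26), if_pos h]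
    rw [alt_unfold i, String.append_assoc]
  · simp [h]
termination_by i.toNat
decreasing_by
  have hfd : PySem.Int.floordiv i 26 = i / 26 := PySem.Int.floordiv_eq_ediv_of_pos (by norm_num)
  omega

-- ===== VERDICT (by name: the statement is the Claim_ definition above) =====
theorem alpha_label_spec : Claim_equal_alpha_label := by
  intro i _
  unfold Spec_alpha_label alpha_label
  rw [alphaLabelLoop_eq_alt, String.append_empty, alt_unfold i]
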